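-- pv_equiv track=rewrite | github.com/njeweg/semantic_graph | extract.py | infer_service_calls
-- ===== SOURCE A (Python) =====
-- def infer_service_calls(source_analysis: dict, known_services: list[str]) -> list[str]:
--     """
--     Look at env var reads, HTTP client URLs, and FeignClient args
--     and try to match them to known service names.
--
--     Heuristic: if an env var key or URL string contains a service name
--     (case-insensitive), we record a CALLS relationship.
--
--     Example: env var "ORDER_SERVICE_URL" → calls "orderservice"
--     """
--     called = set()
--     candidates = (
--         source_analysis.get("env_reads", [])
--         + source_analysis.get("http_clients", [])
--         + source_analysis.get("feign_clients", [])
--         + source_analysis.get("grpc_clients", [])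
--     )
--     for candidate in candidates:
--         normalised = candidate.lower().replace("-", "").replace("_", "").replace(" ", "")
--         for svc in known_services:
--             svc_norm = svc.lower().replace("-", "").replace("_", "")
--             if svc_norm in normalised and svc_norm != "":
--                 called.add(svc)
--     return sorted(called)
-- ===== SOURCE B (Python) =====
-- def infer_service_calls(source_analysis: dict, known_services: list[str]) -> list[str]:
--     # Substring-index strategy: normalize each service once, collect the set of
--     # needed lengths, build one hash set of ALL windows of those lengths over the
--     # normalized candidate texts, then decide each service by a single set lookup.
--     norm = {svc: svc.lower().replace("-", "").replace("_", "") for svc in known_services}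
--     lengths = {len(k) for k in norm.values() if k}
--     windows = set()
--     for key in ("env_reads", "http_clients", "feign_clients", "grpc_clients"):
--         for c in source_analysis.get(key, []):
--             t = c.lower().replace("-", "").replace("_", "").replace(" ", "")
--             for L in lengths:
--                 for i in range(len(t) - L + 1):
--                     windows.add(t[i:i + L])
--     return sorted({svc for svc, k in norm.items() if k and k in windows})
-- ===== Notes on version B (the rewrite author's own statement) =====
-- stated objective: alternative
-- what changed: B replaces A's per-candidate-per-service substring scan with a substring index: it normalizes each service once, collects the set of distinct normalized-service lengths, builds one hash set of all windows of those lengths over the normalized candidate texts, and then decides each service by a single set lookup instead of scanning every candidate.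
import Mathlib
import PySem

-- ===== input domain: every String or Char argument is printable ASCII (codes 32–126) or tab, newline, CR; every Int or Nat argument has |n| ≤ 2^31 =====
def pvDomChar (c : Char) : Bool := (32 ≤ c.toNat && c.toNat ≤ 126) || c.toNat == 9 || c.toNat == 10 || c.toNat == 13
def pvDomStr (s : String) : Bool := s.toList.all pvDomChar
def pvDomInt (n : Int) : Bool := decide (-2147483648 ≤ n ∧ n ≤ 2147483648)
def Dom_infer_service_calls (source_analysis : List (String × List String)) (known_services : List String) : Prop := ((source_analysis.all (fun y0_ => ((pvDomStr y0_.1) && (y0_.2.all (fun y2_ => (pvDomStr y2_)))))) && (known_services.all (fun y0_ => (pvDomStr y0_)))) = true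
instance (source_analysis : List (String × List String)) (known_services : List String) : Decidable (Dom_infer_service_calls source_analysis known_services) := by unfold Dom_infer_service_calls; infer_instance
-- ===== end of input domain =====

-- B replaces A's nested candidate×service substring scan with a substring index:
-- it collects the needed (normalized-service) lengths, builds one hash set of all
-- windows of those lengths over the normalized candidate texts, then decides each
-- service by a single set lookup; equal return value.

-- ===== PORT A =====
def infer_service_calls (source_analysis : List (String × List String)) (known_services : List String) : List String :=
  let candidates :=
    PySem.Dict.getD ⟨source_analysis⟩ "env_reads" []
    ++ PySem.Dict.getD ⟨source_analysis⟩ "http_clients" []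
    ++ PySem.Dict.getD ⟨source_analysis⟩ "feign_clients" []
    ++ PySem.Dict.getD ⟨source_analysis⟩ "grpc_clients" []
  let called : PySem.Set String :=
    candidates.foldl (fun called candidate =>
      let normalised := PySem.Str.replace (PySem.Str.replace (PySem.Str.replace (PySem.Str.lower candidate) "-" "") "_" "") " " ""
      known_services.foldl (fun called svc =>
        let svc_norm := PySem.Str.replace (PySem.Str.replace (PySem.Str.lower svc) "-" "") "_" ""
        if PySem.Str.isIn svc_norm normalised && svc_norm != "" then PySem.Set.add called svc else called)
        called)
      PySem.Set.empty
  PySem.List.sorted called (fun x => x) false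

-- ===== PORT B =====
def pvNormService (svc : String) : String :=
  PySem.Str.replace (PySem.Str.replace (PySem.Str.lower svc) "-" "") "_" ""

def pvNormCandidate (c : String) : String :=
  PySem.Str.replace (PySem.Str.replace (PySem.Str.replace (PySem.Str.lower c) "-" "") "_" "") " " ""

def infer_service_calls_alt (source_analysis : List (String × List String)) (known_services : List String) : List String :=
  let norm : PySem.Dict String String :=
    known_services.foldl (fun d svc => d.insert svc (pvNormService svc)) PySem.Dict.empty
  let lengths : PySem.Set Int :=
    PySem.Set.ofList (((PySem.Dict.values norm).filter (fun k => k != "")).map PySem.Str.len)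
  let windows : PySem.Set String :=
    ["env_reads", "http_clients", "feign_clients", "grpc_clients"].foldl (fun w key =>
      (PySem.Dict.getD ⟨source_analysis⟩ key []).foldl (fun w c =>
        let t := pvNormCandidate c
        lengths.foldl (fun w L =>
          (PySem.List.pyRange 0 (PySem.Str.len t - L + 1)).foldl (fun w i =>
            PySem.Set.add w (PySem.Str.slice t (some i) (some (i + L)))) w) w) w)
      PySem.Set.empty
  PySem.List.sorted
    (PySem.Set.ofList (((PySem.Dict.items norm).filter
      (fun p => p.2 != "" && PySem.Set.contains windows p.2)).map Prod.fst))
    (fun x => x) false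

-- ===== PRECONDITION & SPEC =====
def Spec_infer_service_calls (source_analysis : List (String × List String)) (known_services : List String) (out : List String) : Prop := out = infer_service_calls_alt source_analysis known_services
instance (source_analysis : List (String × List String)) (known_services : List String) (out : List String) : Decidable (Spec_infer_service_calls source_analysis known_services out) := by unfold Spec_infer_service_calls; infer_instance

-- ===== CLAIM (what is proved, stated in full; the proofs are below) =====
def Claim_equal_infer_service_calls : Prop := ∀ (source_analysis : List (String × List String)) (known_services : List String), Dom_infer_service_calls source_analysis known_services → Spec_infer_service_calls source_analysis known_services (infer_service_calls source_analysis known_services)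

-- ===== LEMMAS AND PROOFS =====

-- A's inner loop over `known_services`: preserves Nodup, adds exactly the services
-- satisfying the candidate-fixed test `b`.
theorem pv_foldl_setAdd {α : Type} [BEq α] [LawfulBEq α] (b : α → Bool) (ks : List α) (acc : List α)
    (h : acc.Nodup) :
    (ks.foldl (fun c svc => if b svc then PySem.Set.add c svc else c) acc).Nodup ∧
    (∀ x, x ∈ ks.foldl (fun c svc => if b svc then PySem.Set.add c svc else c) acc ↔
      x ∈ acc ∨ (x ∈ ks ∧ b x = true)) := by
  induction ks generalizing acc with
  | nil => exact ⟨h, by simp⟩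
  | cons s t ih =>
    by_cases hb : b s = true
    · have := ih (PySem.Set.add acc s) (PySem.Set.nodup_add acc s h)
      refine ⟨by simpa [hb] using this.1, fun x => ?_⟩
      rw [List.foldl_cons]
      simp only [hb, if_true]
      rw [(this.2 x)]
      simp only [PySem.Set.mem_add, List.mem_cons]
      constructor
      · rintro (⟨hx | rfl⟩ | ⟨hx, hbx⟩)
        · exact Or.inl hx
        · exact Or.inr ⟨Or.inl rfl, hb⟩
        · exact Or.inr ⟨Or.inr hx, hbx⟩
      · rintro (hx | ⟨(rfl | hx), hbx⟩)
        · exact Or.inl (Or.inl hx)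
        · exact Or.inl (Or.inr rfl)
        · exact Or.inr ⟨hx, hbx⟩
    · have := ih acc h
      refine ⟨by simpa [hb] using this.1, fun x => ?_⟩
      rw [List.foldl_cons]
      simp only [hb, if_false, Bool.false_eq_true]
      rw [(this.2 x)]
      simp only [List.mem_cons]
      constructor
      · rintro (hx | ⟨hx, hbx⟩)
        · exact Or.inl hx
        · exact Or.inr ⟨Or.inr hx, hbx⟩
      · rintro (hx | ⟨(rfl | hx), hbx⟩)
        · exact Or.inl hx
        · exact (hb hbx).elim
        · exact Or.inr ⟨hx, hbx⟩

-- A's outer loop over the candidates: membership is a union over candidates.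
theorem pv_foldl_outer {α β : Type} [BEq α] [LawfulBEq α] (b : β → α → Bool) (ks : List α)
    (cands : List β) (acc : List α) (h : acc.Nodup) :
    (cands.foldl (fun called cand =>
        ks.foldl (fun c svc => if b cand svc then PySem.Set.add c svc else c) called) acc).Nodup ∧
    (∀ x, x ∈ cands.foldl (fun called cand =>
        ks.foldl (fun c svc => if b cand svc then PySem.Set.add c svc else c) called) acc ↔
      x ∈ acc ∨ (x ∈ ks ∧ ∃ cand ∈ cands, b cand x = true)) := by
  induction cands generalizing acc with
  | nil => exact ⟨h, by simp⟩
  | cons c t ih =>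
    have h1 := pv_foldl_setAdd (b c) ks acc h
    have := ih _ h1.1
    refine ⟨this.1, fun x => ?_⟩
    rw [List.foldl_cons, (this.2 x), (h1.2 x)]
    constructor
    · rintro ((hx | ⟨hk, hb⟩) | ⟨hk, cand, hc, hb⟩)
      · exact Or.inl hx
      · exact Or.inr ⟨hk, c, List.mem_cons_self, hb⟩
      · exact Or.inr ⟨hk, cand, List.mem_cons_of_mem _ hc, hb⟩
    · rintro (hx | ⟨hk, cand, hc, hb⟩)
      · exact Or.inl (Or.inl hx)
      · rcases List.mem_cons.mp hc with rfl | hc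
        · exact Or.inl (Or.inr ⟨hk, hb⟩)
        · exact Or.inr ⟨hk, cand, hc, hb⟩

-- generic membership through a fold whose step adds elements describable by P
theorem pv_mem_foldl {α β : Type} (l : List β) (F : List α → β → List α) (P : β → Prop) (y : α)
    (h : ∀ w x, x ∈ l → (y ∈ F w x ↔ y ∈ w ∨ P x)) :
    ∀ init, y ∈ l.foldl F init ↔ y ∈ init ∨ ∃ x ∈ l, P x := by
  induction l with
  | nil => simp
  | cons a t ih =>
    intro init
    rw [List.foldl_cons, ih (fun w x hx => h w x (List.mem_cons_of_mem _ hx)),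
      h init a List.mem_cons_self]
    constructor
    · rintro ((hy | hp) | ⟨x, hx, hp⟩)
      · exact Or.inl hy
      · exact Or.inr ⟨a, List.mem_cons_self, hp⟩
      · exact Or.inr ⟨x, List.mem_cons_of_mem _ hx, hp⟩
    · rintro (hy | ⟨x, hx, hp⟩)
      · exact Or.inl (Or.inl hy)
      · rcases List.mem_cons.mp hx with rfl | hx
        · exact Or.inl (Or.inr hp)
        · exact Or.inr ⟨x, hx, hp⟩

-- a dict built by inserting a key-determined value for each element of ks
theorem pv_get?_foldl_insert_fn (f : String → String) (ks : List String)
    (d : PySem.Dict String String) (s : String) :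
    (ks.foldl (fun d k => d.insert k (f k)) d).get? s
      = if s ∈ ks then some (f s) else d.get? s := by
  induction ks generalizing d with
  | nil => simp
  | cons a t ih =>
    rw [List.foldl_cons, ih]
    by_cases hs : s ∈ t
    · simp [hs]
    · by_cases ha : s = a
      · subst ha
        simp [hs, PySem.Dict.get?_insert_self]
      · simp [hs, ha, PySem.Dict.get?_insert_of_ne _ _ ha]

-- the window set of one text t holds k (a normalized service: nonempty, its length
-- collected) iff k is a substring of t
theorem pv_window_iff (lengths : List Int) (hlen : ∀ L ∈ lengths, 1 ≤ L)
    (k t : String) (hk : k.toList ≠ []) (hkL : (k.toList.length : Int) ∈ lengths) :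
    (∃ L ∈ lengths, ∃ i ∈ PySem.List.pyRange 0 (PySem.Str.len t - L + 1),
        k = PySem.Str.slice t (some i) (some (i + L)))
      ↔ PySem.Str.isIn k t = true := by
  rw [PySem.Str.isIn_eq, ← PySem.Chars.exists_prefix_drop_iff_isIn]
  constructor
  · rintro ⟨L, hL, i, hi, hkeq⟩
    obtain ⟨hi0, hi1⟩ := PySem.List.mem_pyRange_one.mp hi
    have h1L := hlen L hL
    refine ⟨i.toNat, ?_⟩
    have : k.toList = List.take ((i + L).toNat - i.toNat) (List.drop i.toNat t.toList) := by
      rw [hkeq, PySem.Str.toList_slice]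
      exact PySem.List.slice_toNat t.toList hi0 (by omega)
    rw [this]
    exact List.take_prefix _ _
  · rintro ⟨j, hpre⟩
    have hjlen : k.toList.length ≤ t.toList.length - j := by
      have := hpre.length_le
      simpa using this
    have hj : j ≤ t.toList.length := by
      by_contra hc
      push Not at hc
      rw [List.drop_eq_nil_of_le (le_of_lt hc)] at hpre
      exact hk (List.prefix_nil.mp hpre)
    have hklen : 1 ≤ k.toList.length := by
      cases hx : k.toList with
      | nil => exact (hk hx).elim
      | cons a l => simp
    refine ⟨(k.toList.length : Int), hkL, (j : Int), ?_, ?_⟩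
    · rw [PySem.List.mem_pyRange_one, PySem.Str.len_eq]
      omega
    · rw [← String.toList_inj, PySem.Str.toList_slice]
      show k.toList = PySem.List.slice t.toList (some (j : Int)) (some ((j : Int) + (k.toList.length : Int)))
      rw [PySem.List.slice_toNat t.toList (by omega) (by omega)]
      have h1 : ((j : Int) + (k.toList.length : Int)).toNat - (j : Int).toNat
          = k.toList.length := by omega
      rw [h1]
      exact List.prefix_iff_eq_take.mp hpre

-- ===== VERDICT (by name: the statement is the Claim_ definition above) =====
set_option maxHeartbeats 1600000 in
theorem infer_service_calls_spec : Claim_equal_infer_service_calls := by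
  intro sa ks _
  unfold Spec_infer_service_calls infer_service_calls infer_service_calls_alt
  -- zeta-reduced forms of both sides
  show PySem.List.sorted
      ((PySem.Dict.getD ⟨sa⟩ "env_reads" [] ++ PySem.Dict.getD ⟨sa⟩ "http_clients" []
        ++ PySem.Dict.getD ⟨sa⟩ "feign_clients" [] ++ PySem.Dict.getD ⟨sa⟩ "grpc_clients" []).foldl
        (fun called candidate => ks.foldl (fun called svc =>
            if PySem.Str.isIn (pvNormService svc) (pvNormCandidate candidate) && (pvNormService svc != "")
            then PySem.Set.add called svc else called) called)
        PySem.Set.empty) (fun x => x) false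
    = PySem.List.sorted
      (PySem.Set.ofList (((ks.foldl (fun (d : PySem.Dict String String) svc => d.insert svc (pvNormService svc)) PySem.Dict.empty).items.filter
        (fun (p : String × String) => p.2 != "" && PySem.Set.contains
          (["env_reads", "http_clients", "feign_clients", "grpc_clients"].foldl (fun w key =>
            (PySem.Dict.getD ⟨sa⟩ key []).foldl (fun w c =>
              (PySem.Set.ofList (((ks.foldl (fun (d : PySem.Dict String String) svc => d.insert svc (pvNormService svc)) PySem.Dict.empty).values.filter
                  (fun (k : String) => k != "")).map PySem.Str.len)).foldl (fun (w : PySem.Set String) (L : Int) =>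
                (PySem.List.pyRange 0 (PySem.Str.len (pvNormCandidate c) - L + 1)).foldl (fun w i =>
                  PySem.Set.add w (PySem.Str.slice (pvNormCandidate c) (some i) (some (i + L)))) w) w) w) PySem.Set.empty)
          p.2)).map Prod.fst))
      (fun x => x) false
  set cands := PySem.Dict.getD ⟨sa⟩ "env_reads" [] ++ PySem.Dict.getD ⟨sa⟩ "http_clients" []
      ++ PySem.Dict.getD ⟨sa⟩ "feign_clients" [] ++ PySem.Dict.getD ⟨sa⟩ "grpc_clients" [] with hcand
  set norm := ks.foldl (fun (d : PySem.Dict String String) svc => d.insert svc (pvNormService svc)) PySem.Dict.empty with hnorm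
  set lengths := PySem.Set.ofList ((norm.values.filter (fun k => k != "")).map PySem.Str.len) with hlengths
  set windows := ["env_reads", "http_clients", "feign_clients", "grpc_clients"].foldl (fun w key =>
      (PySem.Dict.getD ⟨sa⟩ key []).foldl (fun w c =>
        lengths.foldl (fun w L =>
          (PySem.List.pyRange 0 (PySem.Str.len (pvNormCandidate c) - L + 1)).foldl (fun w i =>
            PySem.Set.add w (PySem.Str.slice (pvNormCandidate c) (some i) (some (i + L)))) w) w) w)
      PySem.Set.empty with hwindef
  -- facts about the dict `norm`
  have hkeys : norm.keys = PySem.Set.ofList ks := by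
    rw [hnorm, PySem.Dict.keys_foldl_insert ks (fun _ x => pvNormService x) PySem.Dict.empty,
      PySem.Dict.keys_empty, PySem.Set.update_nil_left]
  have hnd : norm.keys.Nodup := by rw [hkeys]; exact PySem.Set.nodup_ofList ks
  have hget : ∀ s, norm.get? s = if s ∈ ks then some (pvNormService s) else none := by
    intro s
    rw [hnorm, pv_get?_foldl_insert_fn, PySem.Dict.get?_empty]
  have hitems : norm.items = (PySem.Set.ofList ks).map (fun s => (s, pvNormService s)) := by
    rw [PySem.Dict.items_eq_map_keys norm hnd "", hkeys]
    apply List.map_congr_left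
    intro s hs
    have hsk : s ∈ ks := (PySem.Set.mem_ofList ks s).mp hs
    rw [PySem.Dict.getD_eq_get?_getD, hget s, if_pos hsk, Option.getD_some]
  -- facts about `lengths`
  have hmemlen : ∀ L, L ∈ lengths ↔
      ∃ s ∈ ks, pvNormService s ≠ "" ∧ L = PySem.Str.len (pvNormService s) := by
    intro L
    rw [hlengths]
    have hv : norm.values = norm.items.map Prod.snd := rfl
    rw [hv, hitems]
    simp only [PySem.Set.mem_ofList, List.mem_map, List.mem_filter, List.map_map]
    constructor
    · rintro ⟨k, ⟨⟨s, hs, rfl⟩, hne⟩, rfl⟩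
      exact ⟨s, hs, by simpa using hne, rfl⟩
    · rintro ⟨s, hs, hne, rfl⟩
      exact ⟨pvNormService s, ⟨⟨s, hs, rfl⟩, by simpa using hne⟩, rfl⟩
  have hlen1 : ∀ L ∈ lengths, 1 ≤ L := by
    intro L hL
    obtain ⟨s, _, hne, rfl⟩ := (hmemlen L).mp hL
    rw [PySem.Str.len_eq]
    have : (pvNormService s).toList ≠ [] := fun h => hne (String.toList_eq_nil_iff.mp h)
    cases h : (pvNormService s).toList with
    | nil => exact (this h).elim
    | cons a l => simp
  -- membership in the window set
  have hwin : ∀ y, y ∈ windows ↔ ∃ c ∈ cands, ∃ L ∈ lengths,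
      ∃ i ∈ PySem.List.pyRange 0 (PySem.Str.len (pvNormCandidate c) - L + 1),
        y = PySem.Str.slice (pvNormCandidate c) (some i) (some (i + L)) := by
    intro y
    rw [hwindef]
    rw [pv_mem_foldl _ _ (fun key => ∃ c ∈ PySem.Dict.getD ⟨sa⟩ key [], ∃ L ∈ lengths,
        ∃ i ∈ PySem.List.pyRange 0 (PySem.Str.len (pvNormCandidate c) - L + 1),
          y = PySem.Str.slice (pvNormCandidate c) (some i) (some (i + L))) y
      (fun w key _ => pv_mem_foldl _ _ (fun c => ∃ L ∈ lengths,
        ∃ i ∈ PySem.List.pyRange 0 (PySem.Str.len (pvNormCandidate c) - L + 1),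
          y = PySem.Str.slice (pvNormCandidate c) (some i) (some (i + L))) y
        (fun w c _ => pv_mem_foldl _ _ (fun L =>
          ∃ i ∈ PySem.List.pyRange 0 (PySem.Str.len (pvNormCandidate c) - L + 1),
            y = PySem.Str.slice (pvNormCandidate c) (some i) (some (i + L))) y
          (fun w L _ => by
            rw [PySem.Set.mem_foldl_add]) w) w) PySem.Set.empty]
    simp only [PySem.Set.empty, List.not_mem_nil, false_or]
    constructor
    · rintro ⟨key, hkey, c, hc, rest⟩
      refine ⟨c, ?_, rest⟩
      rw [hcand]
      fin_cases hkey <;> simp [hc]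
    · rintro ⟨c, hc, rest⟩
      rw [hcand] at hc
      simp only [List.mem_append] at hc
      rcases hc with ((h1 | h2) | h3) | h4
      · exact ⟨"env_reads", by simp, c, h1, rest⟩
      · exact ⟨"http_clients", by simp, c, h2, rest⟩
      · exact ⟨"feign_clients", by simp, c, h3, rest⟩
      · exact ⟨"grpc_clients", by simp, c, h4, rest⟩
  -- the two result sets
  have hA := pv_foldl_outer
    (b := fun cand svc => PySem.Str.isIn (pvNormService svc) (pvNormCandidate cand)
        && (pvNormService svc != ""))
    ks cands PySem.Set.empty (by simp [PySem.Set.empty])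
  have hBnd : (PySem.Set.ofList ((norm.items.filter
      (fun p => p.2 != "" && PySem.Set.contains windows p.2)).map Prod.fst)).Nodup :=
    PySem.Set.nodup_ofList _
  have hBmem : ∀ x, x ∈ PySem.Set.ofList ((norm.items.filter
      (fun p => p.2 != "" && PySem.Set.contains windows p.2)).map Prod.fst) ↔
      x ∈ ks ∧ pvNormService x ≠ "" ∧ pvNormService x ∈ windows := by
    intro x
    rw [PySem.Set.mem_ofList]
    simp only [List.mem_map, List.mem_filter, hitems, Bool.and_eq_true, bne_iff_ne, ne_eq,
      PySem.Set.contains_iff, PySem.Set.mem_ofList]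
    constructor
    · rintro ⟨⟨s, k⟩, ⟨⟨s', hs', heq⟩, hne, hmem⟩, rfl⟩
      injection heq with h1 h2
      subst h1; subst h2
      exact ⟨hs', hne, hmem⟩
    · rintro ⟨hx, hne, hmem⟩
      exact ⟨(x, pvNormService x), ⟨⟨x, hx, rfl⟩, hne, hmem⟩, rfl⟩
  -- membership agreement, hence permutation, hence equal sorted lists
  have hperm := (List.perm_ext_iff_of_nodup hA.1 hBnd).mpr (fun x => by
    rw [hA.2 x, hBmem x, hwin (pvNormService x)]
    simp only [PySem.Set.empty, List.not_mem_nil, false_or, Bool.and_eq_true, bne_iff_ne, ne_eq]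
    constructor
    · rintro ⟨hx, c, hc, hin, hne⟩
      refine ⟨hx, hne, c, hc, ?_⟩
      exact (pv_window_iff lengths hlen1 (pvNormService x) (pvNormCandidate c)
            (fun h => hne (String.toList_eq_nil_iff.mp h))
            (by rw [← PySem.Str.len_eq, hmemlen]; exact ⟨x, hx, hne, rfl⟩)).mpr hin
    · rintro ⟨hx, hne, c, hc, L, hL, i, hi, heq⟩
      refine ⟨hx, c, hc, ?_, hne⟩
      rw [← pv_window_iff lengths hlen1 (pvNormService x) (pvNormCandidate c)
            (fun h => hne (String.toList_eq_nil_iff.mp h))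
            (by rw [← PySem.Str.len_eq, hmemlen]; exact ⟨x, hx, hne, rfl⟩)]
      exact ⟨L, hL, i, hi, heq⟩)
  exact PySem.List.sorted_eq_sorted_of_perm _ _ _ (fun a b h => h) hperm
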